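-- pv_equiv track=rewrite | github.com/tranductri2003/competitive_programming | LEETCODE/Problems/(Medium) Minimum Impossible OR.py | minImpossibleOR
-- ===== SOURCE A (Python) =====
-- from collections import defaultdict
--
-- def minImpossibleOR(nums):
--     """
--     :type nums: List[int]
--     :rtype: int
--     """
--     check = defaultdict(lambda: False)
--     for num in nums:
--         check[num] = True
--
--     i = 1
--     while check[i] == True:
--         i *= 2
--     return i
-- ===== SOURCE B (Python) =====
-- def minImpossibleOR(nums):
--     """
--     :type nums: List[int]
--     :rtype: int
--     """
--     powers = sorted({n for n in nums if n > 0 and n & (n - 1) == 0})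
--     expected = 1
--     for p in powers:
--         if p != expected:
--             break
--         expected *= 2
--     return expected
-- ===== Notes on version B (the rewrite author's own statement) =====
-- stated objective: alternative
-- what changed: B replaces A's presence dict plus doubling search-by-lookup with a sort-then-scan: it filters out the power-of-two elements, sorts the distinct ones (at most ~32 values), and walks the sorted list against the expected sequence 1,2,4,... until the first gap; no dict of all elements is built, which is the constant-factor speed mechanism.
import Mathlib
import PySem

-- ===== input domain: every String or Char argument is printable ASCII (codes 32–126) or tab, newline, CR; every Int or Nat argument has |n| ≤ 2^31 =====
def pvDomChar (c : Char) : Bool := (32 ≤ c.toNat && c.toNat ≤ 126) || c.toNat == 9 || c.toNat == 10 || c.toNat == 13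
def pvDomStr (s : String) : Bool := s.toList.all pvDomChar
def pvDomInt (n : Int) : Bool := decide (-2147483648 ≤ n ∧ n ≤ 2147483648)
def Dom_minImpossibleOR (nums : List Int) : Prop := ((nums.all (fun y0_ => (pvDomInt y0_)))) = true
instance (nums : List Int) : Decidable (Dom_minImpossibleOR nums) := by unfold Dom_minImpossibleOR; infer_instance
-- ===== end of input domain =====

-- B replaces A's presence dict plus doubling lookup-search with a sort-then-scan: it sorts the
-- distinct power-of-two elements and walks them against the expected sequence 1,2,4,... to the first gap.

-- ===== PORT A =====
-- A's while loop; each successful test consumes a distinct key of check, so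
-- nums.length + 1 iterations always suffice (proved in the lemmas below).
def minImpossibleORGo (check : PySem.Dict Int Bool) : Nat → Int → Int
  | 0, i => i
  | fuel + 1, i => if check.getD i false = true then minImpossibleORGo check fuel (i * 2) else i

def minImpossibleOR (nums : List Int) : Int :=
  let check := nums.foldl (fun d num => d.insert num true) PySem.Dict.empty
  minImpossibleORGo check (nums.length + 1) 1

-- ===== PORT B =====
-- the for-loop with break: walk the sorted powers, doubling `expected` while they match it
def minImpossibleORScan : List Int → Int → Int
  | [], expected => expected
  | p :: ps, expected => if p ≠ expected then expected else minImpossibleORScan ps (expected * 2)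

def minImpossibleOR_alt (nums : List Int) : Int :=
  let powers := PySem.List.sorted
    (PySem.Set.ofList (nums.filter (fun n => decide (0 < n ∧ PySem.Int.band n (n - 1) = 0))))
    (fun x => x) false
  minImpossibleORScan powers 1

-- ===== PRECONDITION & SPEC =====
def Spec_minImpossibleOR (nums : List Int) (out : Int) : Prop := out = minImpossibleOR_alt nums
instance (nums : List Int) (out : Int) : Decidable (Spec_minImpossibleOR nums out) := by unfold Spec_minImpossibleOR; infer_instance

-- ===== CLAIM (what is proved, stated in full; the proofs are below) =====
def Claim_equal_minImpossibleOR : Prop := ∀ (nums : List Int), Dom_minImpossibleOR nums → Spec_minImpossibleOR nums (minImpossibleOR nums)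

-- ===== LEMMAS AND PROOFS =====

theorem two_pow_int_inj {j k : Nat} (h : (2 : Int) ^ j = (2 : Int) ^ k) : j = k := by
  have h' : (2 : Nat) ^ j = 2 ^ k := by exact_mod_cast h
  exact Nat.pow_right_injective (by norm_num) h'

theorem two_pow_int_lt {j k : Nat} (h : j < k) : (2 : Int) ^ j < (2 : Int) ^ k := by
  have h' : (2 : Nat) ^ j < 2 ^ k := Nat.pow_lt_pow_right (by norm_num) h
  exact_mod_cast h'

-- L1: odd number AND its predecessor
theorem land_odd_pred (M : Nat) : (2 * M + 1) &&& (2 * M) = 2 * M := by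
  apply Nat.eq_of_testBit_eq
  intro k
  cases k with
  | zero => simp [Nat.testBit_zero, Nat.mul_mod_right]
  | succ k =>
      rw [Nat.testBit_and]
      have hd1 : (2 * M + 1) / 2 = M := by omega
      have hd2 : (2 * M) / 2 = M := by omega
      simp [Nat.testBit_add_one, hd1, hd2]

-- L2: even number AND odd number, by halves
theorem land_even_odd (q M : Nat) : (2 * q) &&& (2 * M + 1) = 2 * (q &&& M) := by
  apply Nat.eq_of_testBit_eq
  intro k
  cases k with
  | zero => simp [Nat.testBit_zero, Nat.mul_mod_right]
  | succ k =>
      rw [Nat.testBit_and]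
      have hd1 : (2 * q) / 2 = q := by omega
      have hd2 : (2 * M + 1) / 2 = M := by omega
      have hd3 : (2 * (q &&& M)) / 2 = q &&& M := by omega
      simp [Nat.testBit_add_one, hd1, hd2, hd3]

-- the n & (n-1) == 0 test characterises powers of two among positive naturals
theorem land_pred_eq_zero_iff (p : Nat) (hp : 0 < p) :
    (p &&& (p - 1)) = 0 ↔ ∃ k : Nat, p = 2 ^ k := by
  induction p using Nat.strong_induction_on with
  | _ p ih =>
    rcases Nat.even_or_odd p with he | ho
    · obtain ⟨q, hq⟩ := he
      have hq2 : p = 2 * q := by omega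
      have hqpos : 0 < q := by omega
      rw [hq2]
      have hpred : 2 * q - 1 = 2 * (q - 1) + 1 := by omega
      rw [hpred, land_even_odd]
      have hmul : 2 * (q &&& (q - 1)) = 0 ↔ (q &&& (q - 1)) = 0 := by omega
      rw [hmul, ih q (by omega) hqpos]
      constructor
      · rintro ⟨k, rfl⟩; exact ⟨k + 1, by rw [pow_succ]; ring⟩
      · rintro ⟨k, hk⟩
        cases k with
        | zero => omega
        | succ k => exact ⟨k, by rw [pow_succ] at hk; omega⟩
    · obtain ⟨q, hq⟩ := ho
      rw [hq]
      have hpred : 2 * q + 1 - 1 = 2 * q := by omega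
      rw [hpred, land_odd_pred]
      constructor
      · intro h0; exact ⟨0, by omega⟩
      · rintro ⟨k, hk⟩
        cases k with
        | zero => omega
        | succ k => rw [pow_succ] at hk; omega

-- B's filter test holds exactly on positive powers of two
theorem cond_iff (n : Int) :
    (0 < n ∧ PySem.Int.band n (n - 1) = 0) ↔ ∃ k : Nat, n = (2 : Int) ^ k := by
  constructor
  · rintro ⟨hpos, hband⟩
    obtain ⟨p, rfl⟩ := Int.eq_ofNat_of_zero_le (le_of_lt hpos)
    have hppos : 0 < p := by exact_mod_cast hpos
    have hcast : ((p : Int) - 1) = ((p - 1 : Nat) : Int) := by omega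
    rw [hcast, PySem.Int.band_natCast] at hband
    have h0 : (p &&& (p - 1)) = 0 := by exact_mod_cast hband
    obtain ⟨k, hk⟩ := (land_pred_eq_zero_iff p hppos).mp h0
    exact ⟨k, by rw [hk]; push_cast; ring⟩
  · rintro ⟨k, rfl⟩
    have hpos : (0 : Int) < 2 ^ k := by positivity
    refine ⟨hpos, ?_⟩
    have h1 : (1 : Nat) ≤ 2 ^ k := Nat.one_le_two_pow
    have hcast1 : ((2 : Int) ^ k) = ((2 ^ k : Nat) : Int) := by push_cast; ring
    have hcast2 : ((2 : Int) ^ k - 1) = ((2 ^ k - 1 : Nat) : Int) := by push_cast [h1]; ring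
    rw [hcast2, hcast1, PySem.Int.band_natCast]
    have h0 : ((2 ^ k) &&& (2 ^ k - 1)) = 0 :=
      (land_pred_eq_zero_iff (2 ^ k) (Nat.two_pow_pos k)).mpr ⟨k, rfl⟩
    exact_mod_cast h0

-- A's dict is a membership table for nums
theorem getD_fold (nums : List Int) : ∀ (d : PySem.Dict Int Bool) (i : Int),
    (nums.foldl (fun d n => d.insert n true) d).getD i false
      = (d.getD i false || decide (i ∈ nums)) := by
  induction nums with
  | nil => intro d i; simp
  | cons n ns ih =>
      intro d i
      simp only [List.foldl_cons]
      rw [ih]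
      rw [PySem.Dict.getD_insert]
      by_cases h : i = n
      · subst h; simp [List.mem_cons]
      · simp [List.mem_cons, h]

-- A's loop climbs the powers of two up to the first absent one
theorem go_eq (nums : List Int) (check : PySem.Dict Int Bool)
    (hcheck : ∀ i, check.getD i false = decide (i ∈ nums))
    (hEx : ∃ k : Nat, ((2 : Int) ^ k) ∉ nums) :
    ∀ (fuel j : Nat), j ≤ Nat.find hEx → Nat.find hEx < j + fuel →
      minImpossibleORGo check fuel ((2 : Int) ^ j) = (2 : Int) ^ (Nat.find hEx) := by
  intro fuel
  induction fuel with
  | zero => intro j h1 h2; exfalso; omega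
  | succ fuel ih =>
      intro j h1 h2
      by_cases hj : j = Nat.find hEx
      · subst hj
        have hmem := Nat.find_spec hEx
        simp [minImpossibleORGo, hcheck, hmem]
      · have hjlt : j < Nat.find hEx := by omega
        have hmem : ((2 : Int) ^ j) ∈ nums := by
          have := Nat.find_min hEx hjlt
          simpa using this
        have hgd : check.getD ((2 : Int) ^ j) false = true := by
          rw [hcheck]; simpa using hmem
        have hstep : (2 : Int) ^ j * 2 = (2 : Int) ^ (j + 1) := by rw [pow_succ]
        simp only [minImpossibleORGo]
        rw [if_pos hgd, hstep]
        exact ih (j + 1) (by omega) (by omega)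

-- pigeonhole: the first absent power has exponent at most nums.length
theorem find_le_length (nums : List Int) (hEx : ∃ k : Nat, ((2 : Int) ^ k) ∉ nums) :
    Nat.find hEx ≤ nums.length := by
  set k0 := Nat.find hEx with hk0
  have hsub : ((List.range k0).map (fun t => (2 : Int) ^ t)) ⊆ nums := by
    intro x hx
    simp only [List.mem_map, List.mem_range] at hx
    obtain ⟨t, ht, rfl⟩ := hx
    have := Nat.find_min hEx ht
    simpa using this
  have hnd : ((List.range k0).map (fun t => (2 : Int) ^ t)).Nodup :=
    (List.nodup_range).map (fun a b hab => two_pow_int_inj hab)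
  have hcard : ((List.range k0).map (fun t => (2 : Int) ^ t)).toFinset.card = k0 := by
    rw [List.toFinset_card_of_nodup hnd]
    simp
  have hsubF : ((List.range k0).map (fun t => (2 : Int) ^ t)).toFinset ⊆ nums.toFinset := by
    intro x hx
    rw [List.mem_toFinset] at hx ⊢
    exact hsub hx
  have := Finset.card_le_card hsubF
  have h2 := List.toFinset_card_le nums
  omega

-- B's scan: on a strictly increasing list of powers of two that contains exactly the powers
-- 2^k (k ≥ j) present in nums, starting from 2^j it returns the first absent power 2^k0
theorem scan_eq (nums : List Int) (k0 : Nat)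
    (hk0 : ((2 : Int) ^ k0) ∉ nums) (hmin : ∀ k, k < k0 → ((2 : Int) ^ k) ∈ nums) :
    ∀ (L : List Int), L.Pairwise (· < ·) → (∀ x ∈ L, ∃ m : Nat, x = (2 : Int) ^ m) →
    ∀ (j : Nat), j ≤ k0 → (∀ k : Nat, ((2 : Int) ^ k ∈ L) ↔ (j ≤ k ∧ (2 : Int) ^ k ∈ nums)) →
      minImpossibleORScan L ((2 : Int) ^ j) = (2 : Int) ^ k0 := by
  intro L
  induction L with
  | nil =>
      intro _ _ j hj hmem
      have hnotPj : ((2 : Int) ^ j) ∉ nums := by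
        intro hin
        have := (hmem j).mpr ⟨le_refl j, hin⟩
        simp at this
      have hjk0 : j = k0 := by
        by_contra hne
        exact hnotPj (hmin j (by omega))
      simp [minImpossibleORScan, hjk0]
  | cons p ps ih =>
      intro hpw hpows j hj hmem
      obtain ⟨m, rfl⟩ := hpows p (List.mem_cons_self ..)
      have hmProp := (hmem m).mp (List.mem_cons_self ..)
      by_cases hjk0 : j = k0
      · subst hjk0
        have hne : (2 : Int) ^ m ≠ (2 : Int) ^ j := by
          intro hEq
          exact hk0 (two_pow_int_inj hEq ▸ hmProp.2)
        simp [minImpossibleORScan, hne]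
      · -- j < k0, so 2^j ∈ nums and the head must be exactly 2^j
        have hjlt : j < k0 := by omega
        have hPj : ((2 : Int) ^ j) ∈ nums := hmin j hjlt
        have hjL : ((2 : Int) ^ j) ∈ (2 : Int) ^ m :: ps := (hmem j).mpr ⟨le_refl j, hPj⟩
        have hmj : m = j := by
          rcases List.mem_cons.mp hjL with hEq | hIn
          · exact (two_pow_int_inj hEq).symm
          · -- head < 2^j contradicts j ≤ m
            have hlt : (2 : Int) ^ m < (2 : Int) ^ j := (List.pairwise_cons.mp hpw).1 _ hIn
            have : (2 : Int) ^ j ≤ (2 : Int) ^ m := by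
              rcases Nat.lt_or_ge j m with h | h
              · exact le_of_lt (two_pow_int_lt h)
              · have : j = m := by omega
                simp [this]
            omega
        subst hmj
        have hstep : (2 : Int) ^ m * 2 = (2 : Int) ^ (m + 1) := by rw [pow_succ]
        simp only [minImpossibleORScan]
        rw [if_neg (by simp), hstep]
        refine ih (List.pairwise_cons.mp hpw).2
          (fun x hx => hpows x (List.mem_cons_of_mem _ hx)) (m + 1) (by omega) ?_
        intro k
        constructor
        · intro hkps
          have hkL := (hmem k).mp (List.mem_cons_of_mem _ hkps)
          have hlt : (2 : Int) ^ m < (2 : Int) ^ k := (List.pairwise_cons.mp hpw).1 _ hkps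
          have hne : k ≠ m := by
            intro h; subst h; omega
          exact ⟨by omega, hkL.2⟩
        · rintro ⟨hk1, hk2⟩
          have hkL : ((2 : Int) ^ k) ∈ (2 : Int) ^ m :: ps := (hmem k).mpr ⟨by omega, hk2⟩
          rcases List.mem_cons.mp hkL with hEq | hIn
          · exact absurd (two_pow_int_inj hEq) (by omega)
          · exact hIn

theorem minImpossibleOR_spec : Claim_equal_minImpossibleOR := by
  intro nums hdom
  unfold Spec_minImpossibleOR
  have hEx : ∃ k : Nat, ((2 : Int) ^ k) ∉ nums := by
    refine ⟨32, fun hm => ?_⟩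
    have := List.all_eq_true.mp hdom _ hm
    simp [pvDomInt] at this
  set k0 := Nat.find hEx with hk0
  -- A's side
  have hA : minImpossibleOR nums = (2 : Int) ^ k0 := by
    unfold minImpossibleOR
    have hcheck : ∀ i, (nums.foldl (fun d num => d.insert num true) PySem.Dict.empty).getD i false
        = decide (i ∈ nums) := by
      intro i
      rw [getD_fold]
      simp
    have hle := find_le_length nums hEx
    have := go_eq nums _ hcheck hEx (nums.length + 1) 0 (by omega) (by omega)
    simpa using this
  -- B's side
  have hB : minImpossibleOR_alt nums = (2 : Int) ^ k0 := by
    unfold minImpossibleOR_alt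
    set F := nums.filter (fun n => decide (0 < n ∧ PySem.Int.band n (n - 1) = 0)) with hF
    set L := PySem.List.sorted (PySem.Set.ofList F) (fun x => x) false with hL
    have hmemL : ∀ x : Int, x ∈ L ↔ x ∈ F := by
      intro x
      rw [hL, PySem.List.mem_sorted, PySem.Set.mem_ofList]
    have hpw : L.Pairwise (· < ·) := by
      rw [hL]; exact PySem.List.sorted_ofList_pairwise_lt F
    have hpows : ∀ x ∈ L, ∃ m : Nat, x = (2 : Int) ^ m := by
      intro x hx
      have hxF := (hmemL x).mp hx
      rw [hF, List.mem_filter] at hxF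
      exact (cond_iff x).mp (by simpa using hxF.2)
    have hmem : ∀ k : Nat, ((2 : Int) ^ k ∈ L) ↔ (0 ≤ k ∧ (2 : Int) ^ k ∈ nums) := by
      intro k
      rw [hmemL, hF, List.mem_filter]
      have hc : (0 < (2 : Int) ^ k ∧ PySem.Int.band ((2 : Int) ^ k) ((2 : Int) ^ k - 1) = 0) :=
        (cond_iff _).mpr ⟨k, rfl⟩
      simp [hc]
    have hspec := Nat.find_spec hEx
    have hmin : ∀ k, k < k0 → ((2 : Int) ^ k) ∈ nums := by
      intro k hk
      have := Nat.find_min hEx hk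
      simpa using this
    have := scan_eq nums k0 hspec hmin L hpw hpows 0 (Nat.zero_le _) (by simpa using hmem)
    simpa using this
  rw [hA, hB]
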